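-- pv_equiv track=rewrite | github.com/hgkim1598/Python_Algorithm | 프로그래머스/lv1/17681. ［1차］ 비밀지도/［1차］ 비밀지도.py | solution
-- ===== SOURCE A (Python) =====
-- def to_bin(arr, n):
--     bin_matrix = []
--     for i in arr:
--         n_to_bin = bin(i)[2:].zfill(n)
--         bin_list = []
--         for j in n_to_bin:
--             bin_list.append(int(j))
--         bin_matrix.append(bin_list)
--     return bin_matrix
--
-- def wall_or_empty(arr):
--     for i in range(len(arr)):
--         for j in range(len(arr[i])):
--             if arr[i][j] == 1:
--                 arr[i][j] = '#'
--             else: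
--                 arr[i][j] = ' '
--     return arr
--
-- def solution(n, arr1, arr2):
--     answer = []
--     bin_mat_1 = to_bin(arr1, n)
--     bin_mat_2 = to_bin(arr2, n)
--     woe_1 = wall_or_empty(bin_mat_1)
--     woe_2 = wall_or_empty(bin_mat_2)
--     for i in range(n):
--         temp = ''
--         for j in range(n):
--             if woe_1[i][j] == ' ' and woe_2[i][j] == ' ':
--                 temp += ' '
--             else:
--                 temp += '#'
--         answer.append(temp)
--     return answer
-- ===== SOURCE B (Python) =====
-- def solution(n, arr1, arr2):
--     tr = str.maketrans('10', '# ')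
--     return [bin(arr1[i] | arr2[i])[2:].zfill(n).translate(tr) for i in range(n)]
-- ===== Notes on version B (the rewrite author's own statement) =====
-- stated objective: simpler
-- what changed: B replaces A's two digit-matrix constructions, in-place char conversion and cell-by-cell comparison of two grids with a single pass that ORs the row integers arr1[i] | arr2[i] and renders bin(v)[2:].zfill(n) through a '1'->'#','0'->' ' translation.
-- outside the precondition, e.g. on solution(1, [2], [0]): A returns ['#'], B returns ['# ']; on solution(2, [-1, 0], [0, 0]): A raises ValueError, B returns ['b#', '  ']
import Mathlib
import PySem

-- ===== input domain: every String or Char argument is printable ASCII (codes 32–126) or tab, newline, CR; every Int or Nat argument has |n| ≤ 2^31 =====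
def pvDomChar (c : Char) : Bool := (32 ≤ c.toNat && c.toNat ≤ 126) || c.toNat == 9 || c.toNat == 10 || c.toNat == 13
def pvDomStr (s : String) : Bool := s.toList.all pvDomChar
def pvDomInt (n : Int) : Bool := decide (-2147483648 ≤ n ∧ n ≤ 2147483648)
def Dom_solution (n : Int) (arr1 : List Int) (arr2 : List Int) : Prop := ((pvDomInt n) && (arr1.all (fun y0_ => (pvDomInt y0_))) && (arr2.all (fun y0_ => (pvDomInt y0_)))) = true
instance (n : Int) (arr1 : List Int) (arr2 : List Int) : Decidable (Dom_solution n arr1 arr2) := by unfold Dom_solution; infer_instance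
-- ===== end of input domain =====

-- B renders each row in one pass as the binary string of arr1[i] | arr2[i] (integer OR), translated to '#'/' ',
-- instead of A's digit matrices, in-place char conversion and cell-by-cell comparison: simpler, same asymptotic cost.


-- ===== PORT A =====
-- int(j) for a one-char string j; PySem.Int.ofChars? is none exactly where Python raises ValueError
-- (the 'b' left over from bin() of a negative entry) — those inputs are excluded by Pre_solution.
def pvCharToInt (c : Char) : Int := (PySem.Int.ofChars? [c]).getD 0

-- to_bin: bin(i)[2:].zfill(n), each char through int(); the append loops are the maps.
def pvToBin (arr : List Int) (n : Int) : List (List Int) :=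
  arr.map (fun i =>
    (PySem.Chars.zfill (PySem.List.slice (PySem.Int.toBinChars0b i) (some 2) none) n).map pvCharToInt)

-- wall_or_empty: A mutates each cell in place (1 → '#', else ' '); the port rebuilds the matrix, same values.
def pvWallOrEmpty (m : List (List Int)) : List (List Char) :=
  m.map (fun row => row.map (fun x => if x = 1 then '#' else ' '))

def solution (n : Int) (arr1 : List Int) (arr2 : List Int) : List String :=
  let woe1 := pvWallOrEmpty (pvToBin arr1 n)
  let woe2 := pvWallOrEmpty (pvToBin arr2 n)
  (PySem.List.pyRange 0 n 1).foldl (fun answer i =>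
    answer ++ [String.ofList ((PySem.List.pyRange 0 n 1).foldl (fun temp j =>
      temp ++ [if PySem.List.pyGetD (PySem.List.pyGetD woe1 i []) j '?' = ' ' ∧
                  PySem.List.pyGetD (PySem.List.pyGetD woe2 i []) j '?' = ' '
               then ' ' else '#']) [])]) []

-- ===== PORT B =====
-- str.maketrans('10', '# ') / translate: '1' → '#', '0' → ' ', other chars unchanged.
def pvTr (c : Char) : Char := if c = '1' then '#' else if c = '0' then ' ' else c

def solution_alt (n : Int) (arr1 : List Int) (arr2 : List Int) : List String :=
  (PySem.List.pyRange 0 n 1).map (fun i =>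
    String.ofList ((PySem.Chars.zfill (PySem.List.slice (PySem.Int.toBinChars0b
      (PySem.Int.bor (PySem.List.pyGetD arr1 i 0) (PySem.List.pyGetD arr2 i 0))) (some 2) none) n).map pvTr))

-- ===== PRECONDITION & SPEC =====
-- Pre_ excludes inputs on which A raises (a negative entry anywhere: ValueError on int('b');
-- fewer than n rows with n > 0: IndexError) and inputs with an entry ≥ 2^n among the first n rows,
-- outside the puzzle's n-bit contract, where A's misaligned high-bit prefix and B's overlong row are
-- both unspecified renderings of an out-of-range row.
def Pre_solution (n : Int) (arr1 : List Int) (arr2 : List Int) : Prop :=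
  (∀ x ∈ arr1, 0 ≤ x) ∧ (∀ x ∈ arr2, 0 ≤ x) ∧
  (0 < n → n ≤ (arr1.length : Int) ∧ n ≤ (arr2.length : Int) ∧
    (∀ x ∈ arr1.take n.toNat, x < 2 ^ n.toNat) ∧ (∀ x ∈ arr2.take n.toNat, x < 2 ^ n.toNat))
instance (n : Int) (arr1 : List Int) (arr2 : List Int) : Decidable (Pre_solution n arr1 arr2) := by
  unfold Pre_solution; infer_instance

def pvWitness_solution : Int × List Int × List Int := (2, [1, 2], [2, 1])

def Spec_solution (n : Int) (arr1 : List Int) (arr2 : List Int) (out : List String) : Prop :=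
  out = solution_alt n arr1 arr2
instance (n : Int) (arr1 : List Int) (arr2 : List Int) (out : List String) :
    Decidable (Spec_solution n arr1 arr2 out) := by unfold Spec_solution; infer_instance

-- ===== CLAIM (what is proved, stated in full; the proofs are below) =====
def Claim_equal_solution : Prop := ∀ (n : Int) (arr1 : List Int) (arr2 : List Int),
  Dom_solution n arr1 arr2 → Pre_solution n arr1 arr2 → Spec_solution n arr1 arr2 (solution n arr1 arr2)

-- ===== LEMMAS AND PROOFS =====

-- big-endian binary digits, the value Nat.toDigits 2 computes
def bitsBE (m : Nat) : List Char :=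
  if m < 2 then [if m = 1 then '1' else '0']
  else bitsBE (m / 2) ++ [if m % 2 = 1 then '1' else '0']
termination_by m
decreasing_by exact Nat.div_lt_self (by omega) (by omega)

lemma toDigitsCore_two (fuel : Nat) : ∀ (m : Nat) (ds : List Char), m < fuel →
    Nat.toDigitsCore 2 fuel m ds = bitsBE m ++ ds := by
  induction fuel with
  | zero => intro m ds h; omega
  | succ f ih =>
    intro m ds h
    have hdig : Nat.digitChar (m % 2) = (if m % 2 = 1 then '1' else '0') := by
      rcases Nat.mod_two_eq_zero_or_one m with h2 | h2 <;> simp [h2, Nat.digitChar]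
    rw [Nat.toDigitsCore]
    by_cases h2 : m / 2 = 0
    · have hm : m < 2 := by omega
      rw [if_pos h2, bitsBE, if_pos hm, hdig]
      have : m % 2 = m := Nat.mod_eq_of_lt hm
      rw [this]
      rfl
    · rw [if_neg h2, ih (m / 2) _ (by omega)]
      conv_rhs => rw [bitsBE, if_neg (by omega : ¬ m < 2)]
      rw [hdig]
      simp

lemma toDigits_two (m : Nat) : Nat.toDigits 2 m = bitsBE m := by
  rw [Nat.toDigits, toDigitsCore_two (m + 1) m [] (by omega), List.append_nil]

def bitmap (N m : Nat) : List Char :=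
  (List.range N).map (fun j => if m.testBit (N - 1 - j) then '1' else '0')

lemma bitsBE_cons (m : Nat) : ∃ c cs, bitsBE m = c :: cs ∧ (c = '0' ∨ c = '1') := by
  induction m using Nat.strong_induction_on with
  | _ m ih =>
    by_cases h : m < 2
    · rw [bitsBE, if_pos h]
      exact ⟨_, [], rfl, by split <;> simp⟩
    · rw [bitsBE, if_neg h]
      obtain ⟨c, cs, hc, hd⟩ := ih (m / 2) (Nat.div_lt_self (by omega) (by omega))
      exact ⟨c, cs ++ [if m % 2 = 1 then '1' else '0'], by rw [hc]; simp, hd⟩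

lemma bitmap_zero (N : Nat) : bitmap N 0 = List.replicate N '0' := by
  simp [bitmap]

lemma pad_bitsBE (N : Nat) : ∀ m : Nat, 0 < N → m < 2 ^ N →
    List.replicate (N - (bitsBE m).length) '0' ++ bitsBE m = bitmap N m := by
  induction N with
  | zero => omega
  | succ N ih =>
    intro m _ hm
    have hbit : (if m % 2 = 1 then '1' else '0') = (if m.testBit 0 then '1' else '0') := by
      simp [Nat.testBit_zero]
    have hstep : bitmap (N + 1) m = bitmap N (m / 2) ++ [if m % 2 = 1 then '1' else '0'] := by
      simp only [bitmap, List.range_succ, List.map_append, List.map_singleton]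
      congr 1
      · apply List.map_congr_left
        intro j hj
        simp only [List.mem_range] at hj
        have he : N + 1 - 1 - j = (N - 1 - j) + 1 := by omega
        rw [he, Nat.testBit_succ]
      · have hz : N + 1 - 1 - N = 0 := by omega
        rw [hbit, hz]
    rw [hstep]
    by_cases h2 : m < 2
    · rw [bitsBE, if_pos h2]
      have h0 : m / 2 = 0 := by omega
      rw [h0, bitmap_zero]
      simp only [List.length_singleton, Nat.add_sub_cancel]
      congr 1
      interval_cases m <;> rfl
    · by_cases hN : N = 0
      · exfalso
        subst hN
        omega
      have h1 : m / 2 < 2 ^ N := by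
        rw [Nat.div_lt_iff_lt_mul (by norm_num)]
        rw [pow_succ] at hm
        omega
      rw [bitsBE, if_neg h2, ← ih (m / 2) (by omega) h1]
      have hlen : (bitsBE (m / 2) ++ [if m % 2 = 1 then '1' else '0']).length
          = (bitsBE (m / 2)).length + 1 := by simp
      rw [hlen]
      have he : N + 1 - ((bitsBE (m / 2)).length + 1) = N - (bitsBE (m / 2)).length := by omega
      rw [he, List.append_assoc]

lemma length_bitsBE_le (N m : Nat) (h0 : 0 < N) (hm : m < 2 ^ N) : (bitsBE m).length ≤ N := by
  have := pad_bitsBE N m h0 hm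
  have hb : (bitmap N m).length = N := by simp [bitmap]
  rw [← this] at hb
  simp at hb
  omega

lemma zfill_bitsBE (N m : Nat) (h0 : 0 < N) (hm : m < 2 ^ N) :
    PySem.Chars.zfill (bitsBE m) (N : Int) = bitmap N m := by
  have hle := length_bitsBE_le N m h0 hm
  obtain ⟨c, cs, hc, hd⟩ := bitsBE_cons m
  rw [PySem.Chars.zfill.eq_def]
  by_cases he : (N : Int) ≤ ((bitsBE m).length : Int)
  · rw [if_pos he]
    have hEq : (bitsBE m).length = N := by omega
    have := pad_bitsBE N m h0 hm
    rw [hEq, Nat.sub_self, List.replicate_zero, List.nil_append] at this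
    exact this
  · rw [if_neg he, hc]
    have hsign : ¬ (c = '+' ∨ c = '-') := by rcases hd with h | h <;> subst h <;> decide
    dsimp only
    rw [if_neg hsign, ← hc, ← pad_bitsBE N m h0 hm]
    have hlen' : ((N : Int)).toNat - (bitsBE m).length = N - (bitsBE m).length := by simp
    rw [hlen']

-- binary rendering of a nonnegative in-range value, as both ports compute it
lemma binChars_eq (n : Int) (m : Nat) (h0 : 0 < n) (hm : m < 2 ^ n.toNat) :
    PySem.Chars.zfill (PySem.List.slice (PySem.Int.toBinChars0b (m : Int)) (some 2) none) n
      = bitmap n.toNat m := by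
  have hdrop : PySem.List.slice (PySem.Int.toBinChars0b (m : Int)) (some 2) none
      = Nat.toDigits 2 m := by
    rw [PySem.List.slice_from _ (by omega : (0:Int) ≤ 2)]
    rw [PySem.Int.toBinChars0b]
    rw [if_neg (by omega : ¬ (m : Int) < 0)]
    simp
  rw [hdrop, toDigits_two]
  have hn : n = ((n.toNat : Nat) : Int) := by omega
  rw [hn]
  exact zfill_bitsBE n.toNat m (by omega) hm

lemma pvCharToInt_one : pvCharToInt '1' = 1 := by decide

lemma pvCharToInt_zero : pvCharToInt '0' = 0 := by decide

-- A's row, after to_bin and wall_or_empty, bit by bit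
lemma rowA_char (n : Int) (m : Nat) (h0 : 0 < n) (hm : m < 2 ^ n.toNat) :
    ((PySem.Chars.zfill (PySem.List.slice (PySem.Int.toBinChars0b (m : Int)) (some 2) none) n).map
        pvCharToInt).map (fun x => if x = 1 then '#' else ' ')
      = (List.range n.toNat).map (fun j => if m.testBit (n.toNat - 1 - j) then '#' else ' ') := by
  rw [binChars_eq n m h0 hm, bitmap, List.map_map, List.map_map]
  apply List.map_congr_left
  intro j _
  by_cases h : m.testBit (n.toNat - 1 - j) <;>
    simp [h, Function.comp, pvCharToInt_one, pvCharToInt_zero]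

-- B's row, bit by bit
lemma rowB_char (n : Int) (m : Nat) (h0 : 0 < n) (hm : m < 2 ^ n.toNat) :
    (PySem.Chars.zfill (PySem.List.slice (PySem.Int.toBinChars0b (m : Int)) (some 2) none) n).map pvTr
      = (List.range n.toNat).map (fun j => if m.testBit (n.toNat - 1 - j) then '#' else ' ') := by
  rw [binChars_eq n m h0 hm, bitmap, List.map_map]
  apply List.map_congr_left
  intro j _
  by_cases h : m.testBit (n.toNat - 1 - j) <;> simp [h, Function.comp, pvTr]

-- ===== VERDICT (by name: the statement is the Claim_ definition above) =====
theorem solution_spec : Claim_equal_solution := by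
  intro n arr1 arr2 _ hpre
  unfold Spec_solution solution solution_alt
  obtain ⟨h1, h2, h3⟩ := hpre
  by_cases hn : n ≤ 0
  · rw [PySem.List.pyRange_one_eq_nil hn]
    rfl
  replace hn : 0 < n := by omega
  obtain ⟨hl1, hl2, hb1, hb2⟩ := h3 hn
  rw [PySem.List.foldl_append_singleton_eq_map, List.nil_append]
  apply List.map_congr_left
  intro i hi
  rw [PySem.List.mem_pyRange_one] at hi
  have hiN : i = ((i.toNat : Nat) : Int) := by omega
  set k := i.toNat with hk
  have hkN : k < n.toNat := by omega
  have hk1 : k < arr1.length := by omega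
  have hk2 : k < arr2.length := by omega
  -- the two entries of this row, as naturals
  have ha0 : 0 ≤ arr1[k] := h1 _ (List.getElem_mem hk1)
  have hb0 : 0 ≤ arr2[k] := h2 _ (List.getElem_mem hk2)
  have haT : arr1[k] < 2 ^ n.toNat := by
    have := hb1 ((arr1.take n.toNat)[k]'(by simp; omega)) (List.getElem_mem _)
    rwa [List.getElem_take] at this
  have hbT : arr2[k] < 2 ^ n.toNat := by
    have := hb2 ((arr2.take n.toNat)[k]'(by simp; omega)) (List.getElem_mem _)
    rwa [List.getElem_take] at this
  have hpow : ((2 ^ n.toNat : Nat) : Int) = (2 : Int) ^ n.toNat := by push_cast; ring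
  have ham : arr1[k] = ((arr1[k].toNat : Nat) : Int) := by omega
  have hbm : arr2[k] = ((arr2[k].toNat : Nat) : Int) := by omega
  have hamT : arr1[k].toNat < 2 ^ n.toNat := by omega
  have hbmT : arr2[k].toNat < 2 ^ n.toNat := by omega
  -- A's row lookups
  have hw : ∀ (arr : List Int) (hkl : k < arr.length),
      PySem.List.pyGetD (pvWallOrEmpty (pvToBin arr n)) i []
        = ((PySem.Chars.zfill (PySem.List.slice (PySem.Int.toBinChars0b arr[k]) (some 2) none) n).map
            pvCharToInt).map (fun x => if x = 1 then '#' else ' ') := by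
    intro arr hkl
    rw [hiN, PySem.List.pyGetD_natCast, pvWallOrEmpty, pvToBin, List.map_map,
      List.getD_eq_getElem _ _ (by simpa using hkl), List.getElem_map]
    rfl
  -- B's entry lookups
  have hv1 : PySem.List.pyGetD arr1 i 0 = arr1[k] := by
    rw [hiN, PySem.List.pyGetD_natCast, List.getD_eq_getElem _ _ hk1]
  have hv2 : PySem.List.pyGetD arr2 i 0 = arr2[k] := by
    rw [hiN, PySem.List.pyGetD_natCast, List.getD_eq_getElem _ _ hk2]
  congr 1
  rw [PySem.List.foldl_append_singleton_eq_map, List.nil_append,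
    hw arr1 hk1, hw arr2 hk2, hv1, hv2, ham, hbm, PySem.Int.bor_natCast]
  rw [rowA_char n arr1[k].toNat hn hamT, rowA_char n arr2[k].toNat hn hbmT,
    rowB_char n (arr1[k].toNat ||| arr2[k].toNat) hn (Nat.or_lt_two_pow hamT hbmT)]
  rw [PySem.List.pyRange_one, List.map_map]
  have hNN : (n - 0).toNat = n.toNat := by omega
  rw [hNN]
  apply List.map_congr_left
  intro l hl
  simp only [List.mem_range] at hl
  simp only [Function.comp, zero_add]
  rw [PySem.List.pyGetD_natCast, PySem.List.pyGetD_natCast,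
    PySem.List.getD_map_range _ _ _ _ hl, PySem.List.getD_map_range _ _ _ _ hl]
  by_cases hA : arr1[k].toNat.testBit (n.toNat - 1 - l) <;>
    by_cases hB : arr2[k].toNat.testBit (n.toNat - 1 - l) <;>
      simp [hA, hB, Nat.testBit_or]
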